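-- pv_equiv track=rewrite | github.com/grantholt-byte/grantholt-byte.github.io | tangerine-kings-flipbook/lib/schedule.py | ramp_at_boundaries
-- ===== SOURCE A (Python) =====
-- INTENSITY_ORDER = {"calm": 0, "medium": 1, "heavy": 2}
--
-- ORDER_TO_LABEL = {v: k for k, v in INTENSITY_ORDER.items()}
--
-- def ramp_at_boundaries(entries: list[dict], ramp_keyframes: int) -> list[dict]:
--     """Smooth large (>=2-level) intensity jumps over `ramp_keyframes` preceding frames.
--
--     Inserts the midpoint level between prev and cur for the `ramp_keyframes` frames
--     preceding the jump, so RIFE has a less-extreme pose delta to morph through.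
--     """
--     out = [dict(e) for e in entries]
--     for i in range(1, len(out)):
--         prev_level = INTENSITY_ORDER[out[i - 1]["intensity_label"]]
--         cur_level = INTENSITY_ORDER[out[i]["intensity_label"]]
--         if abs(cur_level - prev_level) >= 2:
--             mid_level = (prev_level + cur_level) // 2
--             for j in range(1, ramp_keyframes + 1):
--                 target = i - j
--                 if target < 0:
--                     break
--                 if INTENSITY_ORDER[out[target]["intensity_label"]] == prev_level:
--                     out[target]["intensity_label"] = ORDER_TO_LABEL[mid_level]
--     return out
-- ===== SOURCE B (Python) =====
-- INTENSITY_ORDER = {"calm": 0, "medium": 1, "heavy": 2}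
--
-- ORDER_TO_LABEL = {v: k for k, v in INTENSITY_ORDER.items()}
--
-- def ramp_at_boundaries(entries, ramp_keyframes):
--     """Per-frame rewrite: each position independently looks ahead at the window
--     of jumps that could ramp it, instead of mutating the list while scanning."""
--     if len(entries) < 2:
--         return [dict(e) for e in entries]
--     levels = [INTENSITY_ORDER[e["intensity_label"]] for e in entries]
--     out = []
--     for t, e in enumerate(entries):
--         d = dict(e)
--         hi = min(t + ramp_keyframes, len(entries) - 1)
--         for i in range(t + 1, hi + 1):
--             if abs(levels[i] - levels[i - 1]) >= 2 and levels[t] == levels[i - 1]: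
--                 d["intensity_label"] = ORDER_TO_LABEL[(levels[i - 1] + levels[i]) // 2]
--                 break
--         out.append(d)
--     return out
-- ===== Notes on version B (the rewrite author's own statement) =====
-- stated objective: alternative
-- what changed: B rebuilds the list as one map: each position independently scans the bounded window of upcoming jumps that could ramp it (first match wins), instead of A's stateful outer scan that mutates earlier slots of the output as jumps are found.
import Mathlib
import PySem

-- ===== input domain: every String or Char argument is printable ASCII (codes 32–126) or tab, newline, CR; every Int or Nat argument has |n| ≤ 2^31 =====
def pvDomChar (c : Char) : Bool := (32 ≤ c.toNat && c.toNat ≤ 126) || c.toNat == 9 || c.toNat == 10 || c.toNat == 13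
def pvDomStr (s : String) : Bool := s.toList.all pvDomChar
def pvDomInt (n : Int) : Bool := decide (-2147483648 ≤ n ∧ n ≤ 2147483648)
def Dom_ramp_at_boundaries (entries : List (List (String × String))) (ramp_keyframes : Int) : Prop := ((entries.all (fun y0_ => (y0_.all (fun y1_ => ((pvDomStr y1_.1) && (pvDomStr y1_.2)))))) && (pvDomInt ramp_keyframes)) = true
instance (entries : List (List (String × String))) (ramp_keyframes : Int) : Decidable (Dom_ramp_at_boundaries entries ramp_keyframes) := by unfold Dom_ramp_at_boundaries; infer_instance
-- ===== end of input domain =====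

-- B rebuilds the list as one map in which each position independently scans the window of
-- upcoming jumps that could ramp it, instead of A's stateful scan mutating earlier output
-- slots as jumps are found (objective: alternative).


-- ===== PORT A =====
def pvINTENSITY_ORDER : PySem.Dict String Int := PySem.Dict.ofList [("calm", 0), ("medium", 1), ("heavy", 2)]
def pvORDER_TO_LABEL : PySem.Dict Int String := PySem.Dict.ofList [((0 : Int), "calm"), (1, "medium"), (2, "heavy")]

-- INTENSITY_ORDER[e["intensity_label"]]; the defaults stand for KeyError and are only reached outside Pre_
def pvLevel (e : List (String × String)) : Int :=
  pvINTENSITY_ORDER.getD ((PySem.Dict.mk e).getD "intensity_label" "") (-100)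

-- e["intensity_label"] = lbl  (in-place dict assignment)
def pvSetLabel (e : List (String × String)) (lbl : String) : List (String × String) :=
  ((PySem.Dict.mk e).insert "intensity_label" lbl).items

-- the inner 'for j in range(1, ramp_keyframes + 1)' of A, with its break and its reads of the mutated out
def rampA_inner (i prev_level mid_level : Int) :
    List Int → List (List (String × String)) → List (List (String × String))
  | [], out => out
  | j :: js, out =>
    let target := i - j
    if target < 0 then out   -- break
    else
      let out' :=
        if pvLevel (PySem.List.pyGetD out target []) = prev_level then
          out.set target.toNat
            (pvSetLabel (PySem.List.pyGetD out target []) (pvORDER_TO_LABEL.getD mid_level ""))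
        else out
      rampA_inner i prev_level mid_level js out'

def ramp_at_boundaries (entries : List (List (String × String))) (ramp_keyframes : Int) :
    List (List (String × String)) :=
  -- out = [dict(e) for e in entries] is a value copy: identity in this model
  (PySem.List.pyRange 1 (entries.length : Int) 1).foldl
    (fun out i =>
      let prev_level := pvLevel (PySem.List.pyGetD out (i - 1) [])
      let cur_level := pvLevel (PySem.List.pyGetD out i [])
      if 2 ≤ (cur_level - prev_level).natAbs then
        rampA_inner i prev_level (PySem.Int.floordiv (prev_level + cur_level) 2)
          (PySem.List.pyRange 1 (ramp_keyframes + 1) 1) out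
      else out)
    entries

-- ===== PORT B =====
-- B's inner 'for i in range(t+1, hi+1): if jump and match: write label; break'
def rampB_scan (levels : List Int) (t : Int) :
    List Int → List (String × String) → List (String × String)
  | [], d => d
  | i :: is, d =>
    let lp := PySem.List.pyGetD levels (i - 1) (-100)
    let lc := PySem.List.pyGetD levels i (-100)
    if 2 ≤ (lc - lp).natAbs ∧ PySem.List.pyGetD levels t (-100) = lp then
      ((PySem.Dict.mk d).insert "intensity_label"
        (pvORDER_TO_LABEL.getD (PySem.Int.floordiv (lp + lc) 2) "")).items  -- break after the write
    else rampB_scan levels t is d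

def ramp_at_boundaries_alt (entries : List (List (String × String))) (ramp_keyframes : Int) :
    List (List (String × String)) :=
  if entries.length < 2 then entries   -- [dict(e) for e in entries] is a value copy
  else
    let levels := entries.map (fun e =>
      pvINTENSITY_ORDER.getD ((PySem.Dict.mk e).getD "intensity_label" "") (-100))
    (PySem.List.enumerate entries 0).map (fun te =>
      let hi := min (te.1 + ramp_keyframes) ((entries.length : Int) - 1)
      rampB_scan levels te.1 (PySem.List.pyRange (te.1 + 1) (hi + 1) 1) te.2)

-- ===== PRECONDITION & SPEC =====
-- Pre_ excludes (for lists with ≥ 2 entries, the only ones whose labels A reads) entries whose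
-- dict has no "intensity_label" key or a label outside {"calm","medium","heavy"} — Python A
-- raises KeyError there — and entries with duplicate keys, which cannot arise from a Python dict
-- (artefact of the association-list model).
def Pre_ramp_at_boundaries (entries : List (List (String × String))) (ramp_keyframes : Int) : Prop :=
  entries.length ≤ 1 ∨
  ∀ e ∈ entries, (e.map Prod.fst).Nodup ∧
    ((PySem.Dict.mk e).get? "intensity_label" = some "calm" ∨
     (PySem.Dict.mk e).get? "intensity_label" = some "medium" ∨
     (PySem.Dict.mk e).get? "intensity_label" = some "heavy")

instance (entries : List (List (String × String))) (ramp_keyframes : Int) :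
    Decidable (Pre_ramp_at_boundaries entries ramp_keyframes) := by
  unfold Pre_ramp_at_boundaries; infer_instance

def pvWitness_ramp_at_boundaries : (List (List (String × String))) × Int :=
  ([[("intensity_label", "calm")], [("intensity_label", "heavy")], [("intensity_label", "calm")]], 2)

def Spec_ramp_at_boundaries (entries : List (List (String × String))) (ramp_keyframes : Int)
    (out : List (List (String × String))) : Prop :=
  out = ramp_at_boundaries_alt entries ramp_keyframes

instance (entries : List (List (String × String))) (ramp_keyframes : Int)
    (out : List (List (String × String))) : Decidable (Spec_ramp_at_boundaries entries ramp_keyframes out) := by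
  unfold Spec_ramp_at_boundaries; infer_instance

-- ===== CLAIM (what is proved, stated in full; the proofs are below) =====
def Claim_equal_ramp_at_boundaries : Prop := ∀ (entries : List (List (String × String))) (ramp_keyframes : Int), Dom_ramp_at_boundaries entries ramp_keyframes → Pre_ramp_at_boundaries entries ramp_keyframes → Spec_ramp_at_boundaries entries ramp_keyframes (ramp_at_boundaries entries ramp_keyframes)

-- ===== LEMMAS AND PROOFS =====

-- the level of the entry at Int index i (default out of range)
def pvLv (entries : List (List (String × String))) (i : Int) : Int :=
  pvLevel (PySem.List.pyGetD entries i [])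

-- "slot t gets ramped by some jump at i < k": the common characterisation of both programs
def pvFlip (entries : List (List (String × String))) (K k t : Int) : Bool :=
  (PySem.List.pyRange (t + 1) k 1).any (fun i =>
    decide (i ≤ t + K) && decide (2 ≤ (pvLv entries i - pvLv entries (i - 1)).natAbs) &&
    decide (pvLv entries t = pvLv entries (i - 1)))

lemma pvFlip_iff (entries : List (List (String × String))) (K k t : Int) :
    pvFlip entries K k t = true ↔
    ∃ i : Int, t < i ∧ i < k ∧ i ≤ t + K ∧
      2 ≤ (pvLv entries i - pvLv entries (i - 1)).natAbs ∧ pvLv entries t = pvLv entries (i - 1) := by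
  simp only [pvFlip, List.any_eq_true, Bool.and_eq_true, decide_eq_true_eq,
    PySem.List.mem_pyRange_one]
  constructor
  · rintro ⟨i, ⟨h1, h2⟩, ⟨h3, h4⟩, h5⟩; exact ⟨i, by omega, h2, h3, h4, h5⟩
  · rintro ⟨i, h1, h2, h3, h4, h5⟩; exact ⟨i, ⟨by omega, h2⟩, ⟨h3, h4⟩, h5⟩

def pvPick (entries : List (List (String × String))) (K k t : Int) : List (String × String) :=
  if pvFlip entries K k t then pvSetLabel (PySem.List.pyGetD entries t []) "medium"
  else PySem.List.pyGetD entries t []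

-- invariant state during A's inner loop at jump i, after targets down to i - m were handled
def pvG (entries : List (List (String × String))) (K i m t : Int) : Bool :=
  pvFlip entries K i t ||
    (decide (i - m ≤ t) && decide (t < i) && decide (pvLv entries t = pvLv entries (i - 1)))

lemma pvG_iff (entries : List (List (String × String))) (K i m t : Int) :
    pvG entries K i m t = true ↔
    pvFlip entries K i t = true ∨ (i - m ≤ t ∧ t < i ∧ pvLv entries t = pvLv entries (i - 1)) := by
  simp [pvG]; tauto

def pvGoodLabels (entries : List (List (String × String))) : Prop :=
  ∀ e ∈ entries, (e.map Prod.fst).Nodup ∧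
    ((PySem.Dict.mk e).get? "intensity_label" = some "calm" ∨
     (PySem.Dict.mk e).get? "intensity_label" = some "medium" ∨
     (PySem.Dict.mk e).get? "intensity_label" = some "heavy")

lemma pvMk_items {κ ν : Type} [BEq κ] (d : PySem.Dict κ ν) : PySem.Dict.mk d.items = d := rfl

lemma pvGetD_nonneg {α : Type} (xs : List α) (i : Int) (d : α) (h : 0 ≤ i) :
    PySem.List.pyGetD xs i d = xs.getD i.toNat d := by
  conv_lhs => rw [← Int.toNat_of_nonneg h]
  exact PySem.List.pyGetD_natCast xs i.toNat d

lemma pvLv_mem (entries : List (List (String × String))) (hP : pvGoodLabels entries)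
    (i : Int) (h0 : 0 ≤ i) (h1 : i < (entries.length : Int)) :
    pvLv entries i = 0 ∨ pvLv entries i = 1 ∨ pvLv entries i = 2 := by
  have hm : PySem.List.pyGetD entries i [] ∈ entries := by
    rw [pvGetD_nonneg _ _ _ h0, List.getD_eq_getElem _ [] (by omega)]
    exact List.getElem_mem (by omega)
  rcases (hP _ hm).2 with h | h | h <;>
    simp [pvLv, pvLevel, PySem.Dict.getD_eq_get?_getD, h, pvINTENSITY_ORDER] <;> decide

lemma pvLevel_medium (e : List (String × String)) : pvLevel (pvSetLabel e "medium") = 1 := by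
  simp [pvLevel, pvSetLabel, pvMk_items, PySem.Dict.getD_insert_self, pvINTENSITY_ORDER]
  decide

lemma pvGetD_set (xs : List (List (String × String))) (nn : Nat) (v : List (String × String))
    (t : Int) (h0 : 0 ≤ t) (ht : t < (xs.length : Int)) (hn : nn < xs.length) :
    PySem.List.pyGetD (xs.set nn v) t [] = if t = (nn : Int) then v else PySem.List.pyGetD xs t [] := by
  rw [pvGetD_nonneg _ _ _ h0, pvGetD_nonneg _ _ _ h0,
      List.getD_eq_getElem _ [] (by simp; omega), List.getD_eq_getElem _ [] (by omega),
      List.getElem_set]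
  split_ifs with h1 h2 h2 <;> first | rfl | omega

-- unfolding one step of the danger window
lemma pvG_succ (entries : List (List (String × String))) (K i m t : Int) (hm : 0 ≤ m) :
    (pvG entries K i (m + 1) t = true) ↔ pvG entries K i m t = true ∨ (t = i - (m + 1) ∧ t < i ∧ pvLv entries t = pvLv entries (i - 1)) := by
  rw [pvG_iff, pvG_iff]
  constructor
  · rintro (h | ⟨h1, h2, h3⟩)
    · exact Or.inl (Or.inl h)
    · by_cases ht : i - m ≤ t
      · exact Or.inl (Or.inr ⟨ht, h2, h3⟩)
      · exact Or.inr ⟨by omega, h2, h3⟩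
  · rintro ((h | ⟨h1, h2, h3⟩) | ⟨h1, h2, h3⟩)
    · exact Or.inl h
    · exact Or.inr ⟨by omega, h2, h3⟩
    · exact Or.inr ⟨by omega, h2, h3⟩

-- pvFlip is false when the window above t is empty
lemma pvFlip_false_at (entries : List (List (String × String))) (K k t : Int) (h : k ≤ t + 1) :
    pvFlip entries K k t = false := by
  by_cases hb : pvFlip entries K k t = true
  · obtain ⟨i, h1, h2, _⟩ := (pvFlip_iff entries K k t).mp hb
    omega
  · exact Bool.eq_false_iff.mpr hb

-- invariant during A's inner loop at jump i: slots carry flips listed by pvG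
def pvInv (entries : List (List (String × String))) (K i m : Int)
    (out : List (List (String × String))) : Prop :=
  out.length = entries.length ∧ ∀ t : Int, 0 ≤ t → t < (entries.length : Int) →
    PySem.List.pyGetD out t [] =
      if pvG entries K i m t then pvSetLabel (PySem.List.pyGetD entries t []) "medium"
      else PySem.List.pyGetD entries t []

-- invariant between A's outer iterations: slots carry pvPick at stage k
def pvPicked (entries : List (List (String × String))) (K k : Int)
    (out : List (List (String × String))) : Prop :=
  out.length = entries.length ∧ ∀ t : Int, 0 ≤ t → t < (entries.length : Int) →
    PySem.List.pyGetD out t [] = pvPick entries K k t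

-- the body of A's outer fold, named (definitionally the lambda in ramp_at_boundaries)
def pvStepA (K : Int) (out : List (List (String × String))) (i : Int) :
    List (List (String × String)) :=
  let prev_level := pvLevel (PySem.List.pyGetD out (i - 1) [])
  let cur_level := pvLevel (PySem.List.pyGetD out i [])
  if 2 ≤ (cur_level - prev_level).natAbs then
    rampA_inner i prev_level (PySem.Int.floordiv (prev_level + cur_level) 2)
      (PySem.List.pyRange 1 (K + 1) 1) out
  else out

-- A's inner ramp loop establishes the full window invariant
lemma pvInnerA (entries : List (List (String × String))) (hP : pvGoodLabels entries)
    (K i : Int) (hi : 1 ≤ i) (hin : i < (entries.length : Int))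
    (hjump : 2 ≤ (pvLv entries i - pvLv entries (i - 1)).natAbs)
    (m : Int) (out : List (List (String × String)))
    (fuel : Nat) (hfuel : (K - m).toNat ≤ fuel)
    (hm0 : 0 ≤ m) (hmax : m ≤ max K 0) (hK0 : K ≤ 0 → m = 0)
    (hinv : pvInv entries K i m out) :
    pvInv entries K i (max K 0)
      (rampA_inner i (pvLv entries (i - 1)) 1 (PySem.List.pyRange (m + 1) (K + 1) 1) out) := by
  obtain ⟨hlen, hspec⟩ := hinv
  have hprev : pvLv entries (i - 1) = 0 ∨ pvLv entries (i - 1) = 2 := by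
    rcases pvLv_mem entries hP (i - 1) (by omega) (by omega) with h | h | h <;>
      rcases pvLv_mem entries hP i (by omega) (by omega) with h' | h' | h' <;> omega
  by_cases hnil : K + 1 ≤ m + 1
  · rw [PySem.List.pyRange_one_eq_nil hnil]
    have hmeq : max K 0 = m := by omega
    rw [hmeq]
    exact ⟨hlen, hspec⟩
  · push_neg at hnil
    cases fuel with
    | zero => exact absurd hnil (by omega)
    | succ f =>
    rw [PySem.List.pyRange_one_cons (by omega : m + 1 < K + 1)]
    simp only [rampA_inner]
    by_cases hneg : i - (m + 1) < 0
    · rw [if_pos hneg]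
      have hGeq : ∀ t : Int, 0 ≤ t → pvG entries K i (max K 0) t = pvG entries K i m t := by
        intro t ht
        rw [Bool.eq_iff_iff, pvG_iff, pvG_iff]
        constructor
        · rintro (h | ⟨h1, h2, h3⟩)
          · exact Or.inl h
          · exact Or.inr ⟨by omega, h2, h3⟩
        · rintro (h | ⟨h1, h2, h3⟩)
          · exact Or.inl h
          · exact Or.inr ⟨by omega, h2, h3⟩
      exact ⟨hlen, fun t a b => by rw [hGeq t a]; exact hspec t a b⟩
    · push_neg at hneg
      rw [if_neg (not_lt.mpr hneg)]
      have htn2 : i - (m + 1) < (entries.length : Int) := by omega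
      have hread := hspec (i - (m + 1)) hneg htn2
      have hlab : pvORDER_TO_LABEL.getD 1 "" = "medium" := by decide
      by_cases hG : pvG entries K i m (i - (m + 1)) = true
      · have hlev : pvLevel (PySem.List.pyGetD out (i - (m + 1)) []) = 1 := by
          rw [hread, if_pos hG]; exact pvLevel_medium _
        rw [if_neg (show ¬ pvLevel (PySem.List.pyGetD out (i - (m + 1)) []) = pvLv entries (i - 1) by
          rw [hlev]; rcases hprev with h | h <;> omega)]
        have hinv' : pvInv entries K i (m + 1) out := by
          refine ⟨hlen, fun t a b => ?_⟩
          by_cases hteq : t = i - (m + 1)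
          · subst hteq
            have hGt : pvG entries K i (m + 1) (i - (m + 1)) = true :=
              (pvG_succ entries K i m (i - (m + 1)) hm0).mpr (Or.inl hG)
            rw [hread, if_pos hG, if_pos hGt]
          · have hGe : pvG entries K i (m + 1) t = pvG entries K i m t := by
              rw [Bool.eq_iff_iff, pvG_succ entries K i m t hm0]
              constructor
              · rintro (h | ⟨h1, _, _⟩)
                · exact h
                · exact absurd h1 hteq
              · exact Or.inl
            rw [hGe]; exact hspec t a b
        exact pvInnerA entries hP K i hi hin hjump (m + 1) out f (by omega) (by omega) (by omega)
          (by omega) hinv'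
      · have hlev : pvLevel (PySem.List.pyGetD out (i - (m + 1)) []) = pvLv entries (i - (m + 1)) := by
          rw [hread, if_neg hG]; rfl
        by_cases hmatch : pvLv entries (i - (m + 1)) = pvLv entries (i - 1)
        · rw [if_pos (show pvLevel (PySem.List.pyGetD out (i - (m + 1)) []) = pvLv entries (i - 1) by
            rw [hlev]; exact hmatch)]
          have hnnc : (((i - (m + 1)).toNat : Int)) = i - (m + 1) := by omega
          have hinv' : pvInv entries K i (m + 1) (out.set (i - (m + 1)).toNat
              (pvSetLabel (PySem.List.pyGetD out (i - (m + 1)) []) (pvORDER_TO_LABEL.getD 1 ""))) := by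
            refine ⟨by rw [List.length_set]; exact hlen, fun t a b => ?_⟩
            rw [pvGetD_set out (i - (m + 1)).toNat _ t a (by omega) (by omega)]
            by_cases hteq : t = (((i - (m + 1)).toNat : Int))
            · rw [if_pos hteq]
              have hGt : pvG entries K i (m + 1) t = true :=
                (pvG_succ entries K i m t hm0).mpr
                  (Or.inr ⟨by omega, by omega, by rw [hteq, hnnc]; exact hmatch⟩)
              rw [if_pos hGt, hread, if_neg hG, hlab, hteq, hnnc]
            · rw [if_neg hteq]
              have hGe : pvG entries K i (m + 1) t = pvG entries K i m t := by
                rw [Bool.eq_iff_iff, pvG_succ entries K i m t hm0]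
                constructor
                · rintro (h | ⟨h1, _, _⟩)
                  · exact h
                  · exact absurd h1 (by omega)
                · exact Or.inl
              rw [hGe]; exact hspec t a b
          exact pvInnerA entries hP K i hi hin hjump (m + 1) _ f (by omega) (by omega) (by omega)
            (by omega) hinv'
        · rw [if_neg (show ¬ pvLevel (PySem.List.pyGetD out (i - (m + 1)) []) = pvLv entries (i - 1) by
            rw [hlev]; exact hmatch)]
          have hinv' : pvInv entries K i (m + 1) out := by
            refine ⟨hlen, fun t a b => ?_⟩
            have hGe : pvG entries K i (m + 1) t = pvG entries K i m t := by
              rw [Bool.eq_iff_iff, pvG_succ entries K i m t hm0]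
              constructor
              · rintro (h | ⟨h1, _, h3⟩)
                · exact h
                · exact absurd (h1 ▸ h3) hmatch
              · exact Or.inl
            rw [hGe]; exact hspec t a b
          exact pvInnerA entries hP K i hi hin hjump (m + 1) out f (by omega) (by omega) (by omega)
            (by omega) hinv'

-- A's outer fold establishes pvPick at every slot
lemma pvOuterA (entries : List (List (String × String))) (hP : pvGoodLabels entries) (K : Int)
    (k : Int) (out : List (List (String × String))) (fuel : Nat)
    (hfuel : ((entries.length : Int) - k).toNat ≤ fuel)
    (hk1 : 1 ≤ k) (hkn : k ≤ (entries.length : Int))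
    (hpk : pvPicked entries K k out) :
    pvPicked entries K (entries.length : Int)
      ((PySem.List.pyRange k (entries.length : Int) 1).foldl (pvStepA K) out) := by
  obtain ⟨hlen, hspec⟩ := hpk
  by_cases hend : (entries.length : Int) ≤ k
  · rw [PySem.List.pyRange_one_eq_nil hend]
    have hkeq : k = (entries.length : Int) := le_antisymm hkn hend
    simp only [List.foldl_nil]
    exact ⟨hlen, fun t a b => by rw [hspec t a b, hkeq]⟩
  · push_neg at hend
    cases fuel with
    | zero => exact absurd hend (by omega)
    | succ f =>
    rw [PySem.List.pyRange_one_cons hend]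
    simp only [List.foldl_cons]
    have hr1 : PySem.List.pyGetD out (k - 1) [] = PySem.List.pyGetD entries (k - 1) [] := by
      rw [hspec (k - 1) (by omega) (by omega)]
      unfold pvPick
      rw [pvFlip_false_at entries K k (k - 1) (by omega)]
      simp
    have hr2 : PySem.List.pyGetD out k [] = PySem.List.pyGetD entries k [] := by
      rw [hspec k (by omega) (by omega)]
      unfold pvPick
      rw [pvFlip_false_at entries K k k (by omega)]
      simp
    have hstep : pvStepA K out k =
        if 2 ≤ (pvLevel (PySem.List.pyGetD entries k []) -
            pvLevel (PySem.List.pyGetD entries (k - 1) [])).natAbs then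
          rampA_inner k (pvLevel (PySem.List.pyGetD entries (k - 1) []))
            (PySem.Int.floordiv (pvLevel (PySem.List.pyGetD entries (k - 1) []) +
              pvLevel (PySem.List.pyGetD entries k [])) 2)
            (PySem.List.pyRange 1 (K + 1) 1) out
        else out := by
      unfold pvStepA
      rw [hr1, hr2]
    by_cases hj : 2 ≤ (pvLevel (PySem.List.pyGetD entries k []) -
        pvLevel (PySem.List.pyGetD entries (k - 1) [])).natAbs
    · rw [if_pos hj] at hstep
      have hjump : 2 ≤ (pvLv entries k - pvLv entries (k - 1)).natAbs := hj
      have hsum : pvLv entries (k - 1) + pvLv entries k = 2 := by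
        rcases pvLv_mem entries hP (k - 1) (by omega) (by omega) with h | h | h <;>
          rcases pvLv_mem entries hP k (by omega) (by omega) with h' | h' | h' <;> omega
      have hmid : PySem.Int.floordiv (pvLevel (PySem.List.pyGetD entries (k - 1) []) +
          pvLevel (PySem.List.pyGetD entries k [])) 2 = 1 := by
        show PySem.Int.floordiv (pvLv entries (k - 1) + pvLv entries k) 2 = 1
        rw [hsum]; decide
      rw [hmid] at hstep
      have hinv0 : pvInv entries K k 0 out := by
        refine ⟨hlen, fun t a b => ?_⟩
        rw [hspec t a b]
        unfold pvPick
        have hGe : pvG entries K k 0 t = pvFlip entries K k t := by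
          rw [Bool.eq_iff_iff, pvG_iff]
          constructor
          · rintro (h | ⟨h1, h2, _⟩)
            · exact h
            · omega
          · exact Or.inl
        rw [hGe]
      have hinner := pvInnerA entries hP K k (by omega) hend hjump 0 out (K - 0).toNat le_rfl
        le_rfl (le_max_right K 0) (fun _ => rfl) hinv0
      obtain ⟨hl', hs'⟩ := hinner
      rw [show ((0:Int) + 1) = 1 from by norm_num,
          show pvLv entries (k - 1) = pvLevel (PySem.List.pyGetD entries (k - 1) []) from rfl] at hl' hs'
      have hpk' : pvPicked entries K (k + 1) (pvStepA K out k) := by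
        rw [hstep]
        refine ⟨hl', fun t a b => ?_⟩
        rw [hs' t a b]
        unfold pvPick
        have hGe : pvG entries K k (max K 0) t = pvFlip entries K (k + 1) t := by
          rw [Bool.eq_iff_iff, pvG_iff, pvFlip_iff entries K (k + 1) t]
          constructor
          · rintro (h | ⟨h1, h2, h3⟩)
            · obtain ⟨i', a1, a2, a3, a4, a5⟩ := (pvFlip_iff entries K k t).mp h
              exact ⟨i', a1, by omega, a3, a4, a5⟩
            · exact ⟨k, h2, by omega, by omega, hjump, h3⟩
          · rintro ⟨i', b1, b2, b3, b4, b5⟩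
            by_cases hik : i' = k
            · subst hik
              exact Or.inr ⟨by omega, by omega, b5⟩
            · exact Or.inl ((pvFlip_iff entries K k t).mpr ⟨i', b1, by omega, b3, b4, b5⟩)
        rw [hGe]
      exact pvOuterA entries hP K (k + 1) _ f (by omega) (by omega) (by omega) hpk'
    · rw [if_neg hj] at hstep
      have hpk' : pvPicked entries K (k + 1) (pvStepA K out k) := by
        rw [hstep]
        refine ⟨hlen, fun t a b => ?_⟩
        rw [hspec t a b]
        unfold pvPick
        have hGe : pvFlip entries K k t = pvFlip entries K (k + 1) t := by
          rw [Bool.eq_iff_iff, pvFlip_iff entries K k t, pvFlip_iff entries K (k + 1) t]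
          constructor
          · rintro ⟨i', a1, a2, a3, a4, a5⟩
            exact ⟨i', a1, by omega, a3, a4, a5⟩
          · rintro ⟨i', b1, b2, b3, b4, b5⟩
            by_cases hik : i' = k
            · subst hik
              exact absurd b4 hj
            · exact ⟨i', b1, by omega, b3, b4, b5⟩
        rw [hGe]
      exact pvOuterA entries hP K (k + 1) _ f (by omega) (by omega) (by omega) hpk'

-- B's window scan returns the flip exactly when a matching jump exists in the window
lemma pvGetD_map_lv (entries : List (List (String × String))) (j : Int)
    (h0 : 0 ≤ j) (h1 : j < (entries.length : Int)) :
    PySem.List.pyGetD (entries.map pvLevel) j (-100) = pvLv entries j := by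
  rw [pvGetD_nonneg _ _ _ h0, pvLv, pvGetD_nonneg _ _ _ h0,
      List.getD_eq_getElem _ _ (by simp; omega), List.getD_eq_getElem _ _ (by omega),
      List.getElem_map]

lemma pvScanB (entries : List (List (String × String))) (hP : pvGoodLabels entries)
    (t : Int) (h0 : 0 ≤ t) (htn : t < (entries.length : Int))
    (d : List (String × String)) (hiEnd : Int) (hEnd : hiEnd ≤ (entries.length : Int) - 1)
    (m : Int) (hm : t + 1 ≤ m) :
    rampB_scan (entries.map pvLevel) t (PySem.List.pyRange m (hiEnd + 1) 1) d =
      if (PySem.List.pyRange m (hiEnd + 1) 1).any (fun i =>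
            decide (2 ≤ (pvLv entries i - pvLv entries (i - 1)).natAbs) &&
            decide (pvLv entries t = pvLv entries (i - 1)))
      then pvSetLabel d "medium" else d := by
  by_cases hnil : hiEnd + 1 ≤ m
  · rw [PySem.List.pyRange_one_eq_nil hnil]
    simp [rampB_scan]
  · push_neg at hnil
    rw [PySem.List.pyRange_one_cons (by omega)]
    have e1 : PySem.List.pyGetD (entries.map pvLevel) (m - 1) (-100) = pvLv entries (m - 1) :=
      pvGetD_map_lv entries (m - 1) (by omega) (by omega)
    have e2 : PySem.List.pyGetD (entries.map pvLevel) m (-100) = pvLv entries m :=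
      pvGetD_map_lv entries m (by omega) (by omega)
    have e3 : PySem.List.pyGetD (entries.map pvLevel) t (-100) = pvLv entries t :=
      pvGetD_map_lv entries t h0 (by omega)
    simp only [rampB_scan, e1, e2, e3, List.any_cons]
    by_cases hc : 2 ≤ (pvLv entries m - pvLv entries (m - 1)).natAbs ∧
        pvLv entries t = pvLv entries (m - 1)
    · rw [if_pos hc]
      have hhead : (decide (2 ≤ (pvLv entries m - pvLv entries (m - 1)).natAbs) &&
          decide (pvLv entries t = pvLv entries (m - 1))) = true := by
        simp only [Bool.and_eq_true, decide_eq_true_eq]; exact hc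
      have hcond : ((decide (2 ≤ (pvLv entries m - pvLv entries (m - 1)).natAbs) &&
          decide (pvLv entries t = pvLv entries (m - 1))) ||
          (PySem.List.pyRange (m + 1) (hiEnd + 1) 1).any (fun i =>
            decide (2 ≤ (pvLv entries i - pvLv entries (i - 1)).natAbs) &&
            decide (pvLv entries t = pvLv entries (i - 1)))) = true := by
        rw [hhead]; exact Bool.true_or _
      rw [if_pos hcond]
      have hsum : pvLv entries (m - 1) + pvLv entries m = 2 := by
        rcases pvLv_mem entries hP (m - 1) (by omega) (by omega) with h | h | h <;>
          rcases pvLv_mem entries hP m (by omega) (by omega) with h' | h' | h' <;> omega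
      rw [hsum]
      have hlab : pvORDER_TO_LABEL.getD (PySem.Int.floordiv 2 2) "" = "medium" := by decide
      rw [hlab]
      rfl
    · rw [if_neg hc]
      have hhead : (decide (2 ≤ (pvLv entries m - pvLv entries (m - 1)).natAbs) &&
          decide (pvLv entries t = pvLv entries (m - 1))) = false := by
        rw [Bool.and_eq_false_iff]
        by_cases h1 : 2 ≤ (pvLv entries m - pvLv entries (m - 1)).natAbs
        · exact Or.inr (by simpa using fun h2 => hc ⟨h1, h2⟩)
        · exact Or.inl (by simpa using h1)
      simp only [hhead, Bool.false_or]
      exact pvScanB entries hP t h0 htn d hiEnd hEnd (m + 1) (by omega)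
termination_by (hiEnd + 1 - m).toNat
decreasing_by omega

-- ===== VERDICT (by name: the statement is the Claim_ definition above) =====
theorem ramp_at_boundaries_spec : Claim_equal_ramp_at_boundaries := by
  intro entries K _hD hP
  unfold Spec_ramp_at_boundaries ramp_at_boundaries ramp_at_boundaries_alt
  by_cases hn : entries.length < 2
  · rw [if_pos hn, show PySem.List.pyRange 1 (entries.length : Int) 1 = [] from
      PySem.List.pyRange_one_eq_nil (by exact_mod_cast (by omega : entries.length ≤ 1))]
    rfl
  · push_neg at hn
    rw [if_neg (by omega)]
    have hP' : pvGoodLabels entries := by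
      rcases hP with h | h
      · omega
      · exact h
    have hpk0 : pvPicked entries K 1 entries := by
      refine ⟨rfl, fun t a b => ?_⟩
      unfold pvPick
      rw [pvFlip_false_at entries K 1 t (by omega)]
      simp
    obtain ⟨hl, hs⟩ := pvOuterA entries hP' K 1 entries entries.length (by omega) le_rfl
      (by exact_mod_cast (by omega : 1 ≤ entries.length)) hpk0
    rw [show (fun (e : List (String × String)) =>
        pvINTENSITY_ORDER.getD ((PySem.Dict.mk e).getD "intensity_label" "") (-100)) = pvLevel from rfl]
    show (PySem.List.pyRange 1 (entries.length : Int) 1).foldl (pvStepA K) entries = _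
    apply List.ext_getElem
    · rw [hl, List.length_map, PySem.List.length_enumerate]
    · intro j hj1 hj2
      have hjn : j < entries.length := by
        simpa [PySem.List.length_enumerate] using hj2
      have hL := hs (j : Int) (by omega) (by exact_mod_cast hjn)
      rw [PySem.List.pyGetD_natCast, List.getD_eq_getElem _ [] (by rw [hl]; exact hjn)] at hL
      rw [hL, List.getElem_map, PySem.List.getElem_enumerate]
      simp only [zero_add]
      rw [pvScanB entries hP' (j : Int) (by omega) (by exact_mod_cast hjn) entries[j]
        (min ((j : Int) + K) ((entries.length : Int) - 1)) (min_le_right _ _) ((j : Int) + 1) le_rfl]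
      unfold pvPick
      have hcond : ((PySem.List.pyRange ((j : Int) + 1)
            (min ((j : Int) + K) ((entries.length : Int) - 1) + 1) 1).any (fun i =>
          decide (2 ≤ (pvLv entries i - pvLv entries (i - 1)).natAbs) &&
          decide (pvLv entries (j : Int) = pvLv entries (i - 1)))) =
          pvFlip entries K (entries.length : Int) (j : Int) := by
        rw [Bool.eq_iff_iff, pvFlip_iff, List.any_eq_true]
        constructor
        · rintro ⟨i, hmem, hcc⟩
          rw [PySem.List.mem_pyRange_one] at hmem
          simp only [Bool.and_eq_true, decide_eq_true_eq] at hcc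
          exact ⟨i, by omega, by omega, by omega, hcc.1, hcc.2⟩
        · rintro ⟨i, h1, h2, h3, h4, h5⟩
          refine ⟨i, ?_, ?_⟩
          · rw [PySem.List.mem_pyRange_one]; omega
          · simp only [Bool.and_eq_true, decide_eq_true_eq]; exact ⟨h4, h5⟩
      rw [hcond, PySem.List.pyGetD_natCast, List.getD_eq_getElem _ [] hjn]
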